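-- pv_equiv track=rewrite | github.com/poloclub/neuro-cartography | src/python/InceptionV1/preprocessing.py | merge_entity_group
-- ===== SOURCE A (Python) =====
-- def merge_entity_group(groups_to_merge, group_n, e2g, g2e):
--     '''
--     Merge groups of entities
--     * input
--         - groups_to_merge: groups to merge
--         - group_n: current group number
--         - e2g: dictionary mapping entity to group
--         - g2e: dictionary mapping group to entities
--     * output
--         - e2g: updated e2g after merging
--         - g2e: updated g2e after merging
--     '''
--
--     if len(groups_to_merge) > 1:
--
--         merged_entities = {}
--         for group in groups_to_merge:
--
--             # Update entities' group number
--             for entity in g2e[group]: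
--                 e2g[entity] = group_n
--                 merged_entities[entity] = True
--
--             # Update old group's entity list
--             g2e[group] = []
--
--         # Update the new group's entity list
--         merged_entities = list(merged_entities.keys())
--         g2e[group_n] = merged_entities
--
--     return e2g, g2e
-- ===== SOURCE B (Python) =====
-- def merge_entity_group(groups_to_merge, group_n, e2g, g2e):
--     if len(groups_to_merge) <= 1:
--         return e2g, g2e
--     gset = set(groups_to_merge)
--     merged, eset = [], set()
--     for g in dict.fromkeys(groups_to_merge):
--         for e in g2e[g]:
--             if e not in eset:
--                 eset.add(e)
--                 merged.append(e)
--     new_e2g = {e: (group_n if e in eset else v) for e, v in e2g.items()}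
--     for e in merged:
--         if e not in new_e2g:
--             new_e2g[e] = group_n
--     new_g2e = {g: ([] if g in gset else es) for g, es in g2e.items()}
--     new_g2e[group_n] = merged
--     return new_e2g, new_g2e
-- ===== Notes on version B (the rewrite author's own statement) =====
-- stated objective: alternative
-- what changed: Instead of mutating e2g/g2e in place entity-by-entity while looping over groups, B gathers the merged entities once (first-occurrence order via an explicit seen-set) and then REBUILDS both dicts by comprehensions over their original items (conditionally rewriting values by set membership), appending only genuinely new entities; returns fresh dicts rather than mutated ones.
import Mathlib
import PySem

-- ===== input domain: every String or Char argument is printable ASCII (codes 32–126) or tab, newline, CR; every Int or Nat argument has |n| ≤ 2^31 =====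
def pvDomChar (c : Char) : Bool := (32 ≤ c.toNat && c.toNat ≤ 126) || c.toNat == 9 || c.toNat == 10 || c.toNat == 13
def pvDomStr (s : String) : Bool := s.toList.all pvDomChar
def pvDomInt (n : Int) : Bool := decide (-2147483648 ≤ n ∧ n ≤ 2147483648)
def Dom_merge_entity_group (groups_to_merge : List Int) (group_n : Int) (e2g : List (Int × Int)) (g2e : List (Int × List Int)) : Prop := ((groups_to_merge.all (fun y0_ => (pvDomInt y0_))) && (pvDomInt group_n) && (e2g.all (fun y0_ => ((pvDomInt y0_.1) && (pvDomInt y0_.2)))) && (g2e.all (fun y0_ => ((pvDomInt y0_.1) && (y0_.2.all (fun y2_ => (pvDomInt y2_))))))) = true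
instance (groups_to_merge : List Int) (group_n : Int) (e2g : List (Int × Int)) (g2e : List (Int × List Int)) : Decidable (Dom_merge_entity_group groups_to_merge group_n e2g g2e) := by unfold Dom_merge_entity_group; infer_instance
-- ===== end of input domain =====

-- B rebuilds both result dicts by comprehensions over the ORIGINAL dicts (membership sets decide each
-- value) instead of A's in-place per-entity mutation; A mutates its dict arguments in place and B does
-- not — the equivalence proved here is about the RETURNED pair only.

-- ===== PORT A =====
def merge_entity_group (groups_to_merge : List Int) (group_n : Int) (e2g : List (Int × Int)) (g2e : List (Int × List Int)) : (List (Int × Int)) × (List (Int × List Int)) :=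
  if groups_to_merge.length > 1 then
    -- for group in groups_to_merge: (for entity in g2e[group]: e2g[entity]=group_n; merged[entity]=True); g2e[group]=[]
    let st := groups_to_merge.foldl
      (fun (st : PySem.Dict Int Int × PySem.Dict Int (List Int) × PySem.Dict Int Bool) group =>
        let ents := st.2.1.getD group []   -- g2e[group]; Pre_ guarantees the key is present (KeyError otherwise)
        let inner := ents.foldl
          (fun (p : PySem.Dict Int Int × PySem.Dict Int Bool) entity =>
            (p.1.insert entity group_n, p.2.insert entity true)) (st.1, st.2.2)
        (inner.1, st.2.1.insert group ([] : List Int), inner.2))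
      (PySem.Dict.mk e2g, PySem.Dict.mk g2e, PySem.Dict.empty)
    let merged_entities := st.2.2.keys
    (st.1.items, (st.2.1.insert group_n merged_entities).items)
  else (e2g, g2e)

-- ===== PORT B =====
def merge_entity_group_alt (groups_to_merge : List Int) (group_n : Int) (e2g : List (Int × Int)) (g2e : List (Int × List Int)) : (List (Int × Int)) × (List (Int × List Int)) :=
  if groups_to_merge.length ≤ 1 then (e2g, g2e)
  else
    let gset : PySem.Set Int := PySem.Set.ofList groups_to_merge
    -- for g in dict.fromkeys(groups_to_merge): for e in g2e[g]: if e not in eset: eset.add(e); merged.append(e)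
    let ms := (PySem.List.dedup groups_to_merge).foldl
      (fun (p : List Int × PySem.Set Int) g =>
        ((PySem.Dict.mk g2e).getD g []).foldl
          (fun (p : List Int × PySem.Set Int) e =>
            if PySem.Set.contains p.2 e then p else (p.1 ++ [e], PySem.Set.add p.2 e)) p)
      ([], PySem.Set.ofList [])
    let merged := ms.1
    let eset := ms.2
    -- new_e2g = {e: (group_n if e in eset else v) for e, v in e2g.items()}
    let ne2g := (PySem.Dict.mk e2g).items.foldl
      (fun (d : PySem.Dict Int Int) p =>
        d.insert p.1 (if PySem.Set.contains eset p.1 then group_n else p.2)) PySem.Dict.empty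
    -- for e in merged: if e not in new_e2g: new_e2g[e] = group_n
    let ne2g := merged.foldl
      (fun (d : PySem.Dict Int Int) e => if d.contains e then d else d.insert e group_n) ne2g
    -- new_g2e = {g: ([] if g in gset else es) for g, es in g2e.items()}; new_g2e[group_n] = merged
    let ng2e := (PySem.Dict.mk g2e).items.foldl
      (fun (d : PySem.Dict Int (List Int)) p =>
        d.insert p.1 (if PySem.Set.contains gset p.1 then ([] : List Int) else p.2)) PySem.Dict.empty
    (ne2g.items, (ng2e.insert group_n merged).items)

-- ===== PRECONDITION & SPEC =====
-- Pre_: e2g and g2e encode Python dicts, so their keys are unique (an assoc list with a duplicated key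
-- represents no dict input A can receive); and when the merge branch runs every listed group must be a
-- key of g2e (Python raises KeyError otherwise).
def Pre_merge_entity_group (groups_to_merge : List Int) (group_n : Int) (e2g : List (Int × Int)) (g2e : List (Int × List Int)) : Prop :=
  (e2g.map Prod.fst).Nodup ∧ (g2e.map Prod.fst).Nodup ∧
  (groups_to_merge.length ≤ 1 ∨ ∀ g ∈ groups_to_merge, g ∈ g2e.map Prod.fst)
instance (groups_to_merge : List Int) (group_n : Int) (e2g : List (Int × Int)) (g2e : List (Int × List Int)) : Decidable (Pre_merge_entity_group groups_to_merge group_n e2g g2e) := by unfold Pre_merge_entity_group; infer_instance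
def pvWitness_merge_entity_group : List Int × Int × (List (Int × Int)) × (List (Int × List Int)) :=
  ([1, 2], 3, [(10, 1), (11, 2)], [(1, [10]), (2, [11, 10])])
def Spec_merge_entity_group (groups_to_merge : List Int) (group_n : Int) (e2g : List (Int × Int)) (g2e : List (Int × List Int)) (out : (List (Int × Int)) × (List (Int × List Int))) : Prop := out = merge_entity_group_alt groups_to_merge group_n e2g g2e
instance (groups_to_merge : List Int) (group_n : Int) (e2g : List (Int × Int)) (g2e : List (Int × List Int)) (out : (List (Int × Int)) × (List (Int × List Int))) : Decidable (Spec_merge_entity_group groups_to_merge group_n e2g g2e out) := by unfold Spec_merge_entity_group; infer_instance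

-- ===== CLAIM (what is proved, stated in full; the proofs are below) =====
def Claim_equal_merge_entity_group : Prop := ∀ (groups_to_merge : List Int) (group_n : Int) (e2g : List (Int × Int)) (g2e : List (Int × List Int)), Dom_merge_entity_group groups_to_merge group_n e2g g2e → Pre_merge_entity_group groups_to_merge group_n e2g g2e → Spec_merge_entity_group groups_to_merge group_n e2g g2e (merge_entity_group groups_to_merge group_n e2g g2e)

-- ===== LEMMAS AND PROOFS =====

-- the flattening recursion underlying A's pass over the groups (clears each group as it goes)
def pvFlat : List Int → PySem.Dict Int (List Int) → List Int × PySem.Dict Int (List Int)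
  | [], g => ([], g)
  | gr :: gs, g =>
      let ents := g.getD gr []
      let p := pvFlat gs (g.insert gr ([] : List Int))
      (ents ++ p.1, p.2)

-- A's fold = flatten then two independent flat folds
lemma afold_eq (gn : Int) (gs : List Int) : ∀ (e : PySem.Dict Int Int) (g : PySem.Dict Int (List Int)) (m : PySem.Dict Int Bool),
    gs.foldl (fun (st : PySem.Dict Int Int × PySem.Dict Int (List Int) × PySem.Dict Int Bool) group =>
        let ents := st.2.1.getD group []
        let inner := ents.foldl
          (fun (p : PySem.Dict Int Int × PySem.Dict Int Bool) entity =>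
            (p.1.insert entity gn, p.2.insert entity true)) (st.1, st.2.2)
        (inner.1, st.2.1.insert group ([] : List Int), inner.2)) (e, g, m)
      = ((pvFlat gs g).1.foldl (fun d x => d.insert x gn) e,
         (pvFlat gs g).2,
         (pvFlat gs g).1.foldl (fun d x => d.insert x true) m) := by
  induction gs with
  | nil => intro e g m; simp [pvFlat]
  | cons gr gs ih =>
      intro e g m
      simp only [List.foldl_cons, pvFlat]
      rw [PySem.List.foldl_prod_mk (f := fun d x => PySem.Dict.insert d x gn)
            (g := fun d x => PySem.Dict.insert d x true)]
      rw [ih]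
      simp [List.foldl_append]

-- dedup via an explicit seen-list recursion
def pvDgo (seen : List Int) : List Int → List Int
  | [] => []
  | x :: xs => if x ∈ seen then pvDgo seen xs else x :: pvDgo (seen ++ [x]) xs

lemma set_update_eq_dgo (xs : List Int) : ∀ (s : PySem.Set Int),
    PySem.Set.update s xs = s ++ pvDgo s xs := by
  induction xs with
  | nil => intro s; simp [pvDgo, PySem.Set.update_nil]
  | cons x xs ih =>
      intro s
      rw [PySem.Set.update_cons, PySem.Set.add_eq_ite]
      by_cases hx : x ∈ s
      · simp [hx, pvDgo, ih]
      · simp [hx, pvDgo, ih (s ++ [x])]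

lemma dedup_eq_dgo (xs : List Int) : PySem.List.dedup xs = pvDgo [] xs := by
  have h := set_update_eq_dgo xs []
  rw [PySem.Set.update_nil_left] at h
  simpa [PySem.List.dedup_eq_ofList] using h

-- invariant: every stored pair whose key is in `seen` already has value gn, and every seen key is present
def pvQ (gn : Int) (seen : List Int) (d : PySem.Dict Int Int) : Prop :=
  (∀ p ∈ d.items, p.1 ∈ seen → p.2 = gn) ∧ (∀ k ∈ seen, k ∈ d.keys)

lemma pvQ_absorb {gn : Int} {seen : List Int} {d : PySem.Dict Int Int} (h : pvQ gn seen d)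
    {k : Int} (hk : k ∈ seen) : d.insert k gn = d := by
  have hc : d.contains k = true := (PySem.Dict.contains_iff_mem_keys d k).2 (h.2 k hk)
  apply PySem.Dict.ext
  rw [PySem.Dict.items_insert_of_contains _ _ hc]
  have : ∀ p ∈ d.items, (if p.1 == k then (k, gn) else p) = p := by
    intro p hp
    by_cases he : p.1 = k
    · have hv : p.2 = gn := h.1 p hp (he ▸ hk)
      cases p; simp_all
    · simp [he]
  rw [List.map_congr_left this]; simp

lemma pvQ_step {gn : Int} {seen : List Int} {d : PySem.Dict Int Int} (h : pvQ gn seen d)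
    (y : Int) : pvQ gn (seen ++ [y]) (d.insert y gn) := by
  constructor
  · intro p hp hmem
    rcases (PySem.Dict.mem_items_insert d y gn p).1 hp with hpe | ⟨hpd, hpne⟩
    · simp [hpe]
    · have : p.1 ∈ seen := by
        rcases List.mem_append.1 hmem with h1 | h1
        · exact h1
        · exact absurd (List.mem_singleton.1 h1) hpne
      exact h.1 p hpd this
  · intro k hk
    rcases List.mem_append.1 hk with h1 | h1
    · exact (PySem.Dict.mem_keys_insert d y k gn).2 (Or.inr (h.2 k h1))
    · exact (PySem.Dict.mem_keys_insert d y k gn).2 (Or.inl (List.mem_singleton.1 h1))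

-- inserting a constant value: duplicates may be skipped
lemma insAll_dgo (gn : Int) (xs : List Int) : ∀ (seen : List Int) (d : PySem.Dict Int Int),
    pvQ gn seen d →
    xs.foldl (fun d x => d.insert x gn) d = (pvDgo seen xs).foldl (fun d x => d.insert x gn) d := by
  induction xs with
  | nil => intro seen d _; simp [pvDgo]
  | cons x xs ih =>
      intro seen d hQ
      by_cases hx : x ∈ seen
      · simp only [pvDgo, hx, if_pos, List.foldl_cons]
        rw [pvQ_absorb hQ hx]
        exact ih seen d hQ
      · simp only [pvDgo, hx, if_neg, List.foldl_cons, not_false_iff]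
        exact ih (seen ++ [x]) (d.insert x gn) (pvQ_step hQ x)

lemma keys_insAllM (xs : List Int) :
    (xs.foldl (fun (d : PySem.Dict Int Bool) x => d.insert x true) PySem.Dict.empty).keys
      = PySem.List.dedup xs := by
  rw [PySem.Dict.keys_foldl_insert (f := fun _ _ => true)]
  simp [PySem.Dict.keys_empty, PySem.Set.update_nil_left, PySem.List.dedup_eq_ofList]

-- ---- NEW: characterisations relating A's mutate-in-place passes to B's rebuild passes ----

-- A's flat list: clearing groups as they are read = reading the ORIGINAL dict on the deduped groups
lemma pvFlat_fst (d0 : PySem.Dict Int (List Int)) (gs : List Int) :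
    ∀ (seen : List Int) (d : PySem.Dict Int (List Int)),
    (∀ g, d.getD g [] = if g ∈ seen then [] else d0.getD g []) →
    (pvFlat gs d).1 = (pvDgo seen gs).flatMap (fun g => d0.getD g []) := by
  induction gs with
  | nil => intro seen d _; simp [pvFlat, pvDgo]
  | cons gr gs ih =>
      intro seen d hinv
      have hnext : ∀ g, (d.insert gr ([] : List Int)).getD g [] =
          if g ∈ seen ++ [gr] then [] else d0.getD g [] := by
        intro g
        rw [PySem.Dict.getD_insert]
        by_cases hg : g = gr
        · simp [hg]
        · simp [hg, hinv g, List.mem_append]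
      by_cases hgr : gr ∈ seen
      · simp only [pvFlat, pvDgo, hgr, if_pos]
        rw [hinv gr]
        simp only [hgr, if_pos, List.nil_append]
        have hseen : ∀ g, (d.insert gr ([] : List Int)).getD g [] =
            if g ∈ seen then [] else d0.getD g [] := by
          intro g
          rw [hnext g]
          by_cases hgs : g ∈ seen
          · simp [hgs, List.mem_append]
          · have hne : g ≠ gr := fun h => hgs (h ▸ hgr)
            simp [hgs, List.mem_append, hne]
        exact ih seen _ hseen
      · simp only [pvFlat, pvDgo, hgr, if_neg, not_false_iff]
        rw [hinv gr]
        simp only [hgr, if_neg, not_false_iff, List.flatMap_cons]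
        rw [ih (seen ++ [gr]) _ hnext]

-- A clears every listed group in place: the g2e dict after the loop, as a value map on items
lemma pvFlat_snd (gs : List Int) : ∀ (d : PySem.Dict Int (List Int)),
    (∀ g ∈ gs, g ∈ d.keys) →
    (pvFlat gs d).2.items = d.items.map (fun p => if p.1 ∈ gs then (p.1, ([] : List Int)) else p) := by
  induction gs with
  | nil => intro d _; simp [pvFlat]
  | cons gr gs ih =>
      intro d hk
      have hc : d.contains gr = true :=
        (PySem.Dict.contains_iff_mem_keys d gr).2 (hk gr (List.mem_cons_self ..))
      have hkeys : (d.insert gr ([] : List Int)).keys = d.keys :=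
        PySem.Dict.keys_insert_of_contains d _ hc
      have hrec := ih (d.insert gr ([] : List Int))
        (fun g hg => hkeys ▸ hk g (List.mem_cons_of_mem _ hg))
      simp only [pvFlat]
      rw [hrec, PySem.Dict.items_insert_of_contains _ _ hc, List.map_map]
      apply List.map_congr_left
      intro p _
      by_cases he : p.1 = gr
      · cases p with
        | mk a b => simp_all [Function.comp]
      · simp [Function.comp, he, List.mem_cons]

-- B's gather loop over a flat list = ordered dedup + seen set
lemma msfold_eq (flat : List Int) : ∀ (acc : List Int) (s : PySem.Set Int),
    flat.foldl (fun (p : List Int × PySem.Set Int) e =>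
        if PySem.Set.contains p.2 e then p else (p.1 ++ [e], PySem.Set.add p.2 e)) (acc, s)
      = (acc ++ pvDgo s flat, PySem.Set.update s flat) := by
  induction flat with
  | nil => intro acc s; simp [pvDgo, PySem.Set.update_nil]
  | cons x xs ih =>
      intro acc s
      rw [List.foldl_cons, PySem.Set.update_cons, PySem.Set.add_eq_ite]
      by_cases hx : x ∈ s
      · have hcs : PySem.Set.contains s x = true := (PySem.Set.contains_iff s x).2 hx
        simp only [hcs, if_true, hx, if_pos]
        rw [ih acc s]
        simp [pvDgo, hx]
      · have hcs : PySem.Set.contains s x = false := by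
          cases h : PySem.Set.contains s x
          · rfl
          · exact absurd ((PySem.Set.contains_iff s x).1 h) hx
        simp only [hcs, Bool.false_eq_true, if_false, hx, if_neg, not_false_iff]
        rw [ih (acc ++ [x]) (s ++ [x])]
        simp [pvDgo, hx]

-- B's nested gather loop (groups then entities) = one fold over the flattened entity list
lemma nested_fold_eq (L : Int → List Int)
    (step : (List Int × PySem.Set Int) → Int → (List Int × PySem.Set Int)) (gl : List Int) :
    ∀ (p : List Int × PySem.Set Int),
    gl.foldl (fun p g => (L g).foldl step p) p = (gl.flatMap L).foldl step p := by
  induction gl with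
  | nil => intro p; simp
  | cons g gl ih => intro p; simp [List.foldl_append, ih]

-- A's constant-value insert loop over distinct keys, as items: values rewritten in place, new keys appended
lemma insAll_items (gn : Int) (M : List Int) : ∀ (d : PySem.Dict Int Int), M.Nodup →
    (M.foldl (fun d e => d.insert e gn) d).items
      = d.items.map (fun p => if p.1 ∈ M then (p.1, gn) else p)
        ++ (M.filter (fun e => !d.contains e)).map (fun e => (e, gn)) := by
  induction M with
  | nil => simp
  | cons e M ih =>
      intro d hnd
      have heM : e ∉ M := (List.nodup_cons.1 hnd).1
      have hrec := ih (d.insert e gn) (List.nodup_cons.1 hnd).2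
      simp only [List.foldl_cons]
      rw [hrec]
      by_cases hc : d.contains e = true
      · rw [PySem.Dict.items_insert_of_contains _ _ hc, List.map_map]
        have hfilter : M.filter (fun x => !(d.insert e gn).contains x)
            = M.filter (fun x => !d.contains x) := by
          apply List.filter_congr
          intro x hx
          have hxe : ¬ (x == e) := by
            simp only [beq_iff_eq]; exact fun h => heM (h ▸ hx)
          rw [PySem.Dict.contains_insert]
          simp [hxe]
        rw [hfilter]
        have : List.filter (fun x => !d.contains x) (e :: M)
            = M.filter (fun x => !d.contains x) := by simp [List.filter_cons, hc]
        rw [this]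
        congr 1
        apply List.map_congr_left
        intro p _
        by_cases he : p.1 = e
        · simp [Function.comp, he, heM, List.mem_cons]
        · simp [Function.comp, he, List.mem_cons]
      · have hcf : d.contains e = false := by cases h : d.contains e; rfl; exact absurd h hc
        rw [PySem.Dict.items_insert_of_not_contains _ _ hcf, List.map_append]
        have hfilter : M.filter (fun x => !(d.insert e gn).contains x)
            = M.filter (fun x => !d.contains x) := by
          apply List.filter_congr
          intro x hx
          have hxe : ¬ (x == e) := by
            simp only [beq_iff_eq]; exact fun h => heM (h ▸ hx)
          rw [PySem.Dict.contains_insert]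
          simp [hxe]
        rw [hfilter]
        have h1 : List.map (fun p : Int × Int => if p.1 ∈ M then (p.1, gn) else p) [(e, gn)]
            = [(e, gn)] := by simp [heM]
        have hdk : ∀ p ∈ d.items, p.1 ≠ e := by
          intro p hp hpe
          have : d.contains p.1 = true :=
            (PySem.Dict.contains_iff_mem_keys d p.1).2 (PySem.Dict.mem_keys_of_mem_items d hp)
          rw [hpe] at this; rw [this] at hcf; simp at hcf
        have hcongr : d.items.map (fun p : Int × Int => if p.1 ∈ M then (p.1, gn) else p)
            = d.items.map (fun p => if p.1 ∈ e :: M then (p.1, gn) else p) := by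
          apply List.map_congr_left
          intro p hp
          have hiff : (p.1 ∈ e :: M) ↔ (p.1 ∈ M) := by
            simp [List.mem_cons, hdk p hp]
          simp only [hiff]
        rw [h1, hcongr, List.append_assoc]
        simp [List.filter_cons, hcf]

-- B's append-if-missing loop over distinct keys, as items: pure append of the genuinely new keys
lemma insNew_items (gn : Int) (M : List Int) : ∀ (d : PySem.Dict Int Int), M.Nodup →
    (M.foldl (fun d e => if d.contains e then d else d.insert e gn) d).items
      = d.items ++ (M.filter (fun e => !d.contains e)).map (fun e => (e, gn)) := by
  induction M with
  | nil => simp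
  | cons e M ih =>
      intro d hnd
      have heM : e ∉ M := (List.nodup_cons.1 hnd).1
      simp only [List.foldl_cons]
      by_cases hc : d.contains e = true
      · rw [hc]
        simp only [if_pos]
        rw [ih d (List.nodup_cons.1 hnd).2]
        simp [List.filter_cons, hc]
      · have hcf : d.contains e = false := by cases h : d.contains e; rfl; exact absurd h hc
        rw [hcf]
        simp only [Bool.false_eq_true, if_neg, not_false_iff]
        rw [ih (d.insert e gn) (List.nodup_cons.1 hnd).2]
        rw [PySem.Dict.items_insert_of_not_contains _ _ hcf]
        have hfilter : M.filter (fun x => !(d.insert e gn).contains x)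
            = M.filter (fun x => !d.contains x) := by
          apply List.filter_congr
          intro x hx
          have hxe : ¬ (x == e) := by
            simp only [beq_iff_eq]; exact fun h => heM (h ▸ hx)
          rw [PySem.Dict.contains_insert]
          simp [hxe]
        rw [hfilter]
        simp [List.filter_cons, hcf]

-- ===== VERDICT (by name: the statement is the Claim_ definition above) =====
theorem merge_entity_group_spec : Claim_equal_merge_entity_group := by
  intro gs gn e2g g2e _ hpre
  obtain ⟨hnd_e, hnd_g, hkeys⟩ := hpre
  unfold Spec_merge_entity_group merge_entity_group merge_entity_group_alt
  by_cases hlen : gs.length > 1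
  · have hle : ¬ gs.length ≤ 1 := by omega
    rcases hkeys with hk | hk
    · omega
    simp only [hlen, hle, if_pos, if_neg, not_false_iff]
    set gd := PySem.Dict.mk g2e with hgd
    set ed := PySem.Dict.mk e2g with hed
    have hgd_items : gd.items = g2e := rfl
    have hed_items : ed.items = e2g := rfl
    have hgd_keys : gd.keys = g2e.map Prod.fst := rfl
    -- shared flat entity list
    set flat := (PySem.List.dedup gs).flatMap (fun g => gd.getD g []) with hflat
    -- A's flat list equals it
    have hA_flat : (pvFlat gs gd).1 = flat := by
      rw [pvFlat_fst gd gs [] gd (by intro g; simp), ← dedup_eq_dgo]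
    -- B's gather loop
    have hB_ms : (PySem.List.dedup gs).foldl
        (fun (p : List Int × PySem.Set Int) g =>
          (gd.getD g []).foldl
            (fun (p : List Int × PySem.Set Int) e =>
              if PySem.Set.contains p.2 e then p else (p.1 ++ [e], PySem.Set.add p.2 e)) p)
        ([], PySem.Set.ofList [])
        = (PySem.List.dedup flat, PySem.Set.ofList flat) := by
      rw [nested_fold_eq, msfold_eq, ← hflat]
      have h0 : (PySem.Set.ofList ([] : List Int)) = ([] : List Int) := rfl
      rw [h0, List.nil_append, PySem.Set.update_nil_left, ← dedup_eq_dgo]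
    set M := PySem.List.dedup flat with hM
    have hMnd : M.Nodup := by rw [hM, PySem.List.dedup_eq_ofList]; exact PySem.Set.nodup_ofList flat
    have hmemM : ∀ x, x ∈ M ↔ x ∈ flat := by
      intro x
      rw [hM, PySem.List.dedup_eq_ofList]
      exact PySem.Set.mem_ofList flat x
    rw [afold_eq]
    simp only [hB_ms, hA_flat]
    refine Prod.ext ?_ ?_
    · -- e2g component
      -- A: fold over flat = fold over M (dedup), then characterise items
      have hAfold : flat.foldl (fun d x => d.insert x gn) ed
          = M.foldl (fun d x => d.insert x gn) ed := by
        rw [insAll_dgo gn flat [] ed ⟨by simp, by simp⟩, ← dedup_eq_dgo, ← hM]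
      simp only [hAfold]
      rw [insAll_items gn M ed hMnd]
      -- B: rebuild pass over e2g items (all keys fresh and distinct), then append-if-missing pass
      have hfreshB : ∀ p ∈ ed.items, (PySem.Dict.empty : PySem.Dict Int Int).contains p.1 = false := by
        intro p _; exact PySem.Dict.contains_empty p.1
      have hrebuild : (ed.items.foldl
          (fun (d : PySem.Dict Int Int) p =>
            d.insert p.1 (if PySem.Set.contains (PySem.Set.ofList flat) p.1 then gn else p.2))
          PySem.Dict.empty).items
          = ed.items.map (fun p => (p.1, if PySem.Set.contains (PySem.Set.ofList flat) p.1 then gn else p.2)) := by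
        rw [PySem.Dict.items_foldl_insert_fresh (k := Prod.fst)
              (v := fun p => if PySem.Set.contains (PySem.Set.ofList flat) p.1 then gn else p.2)
              (l := ed.items) (d := PySem.Dict.empty) hfreshB (by rw [hed_items]; exact hnd_e)]
        rfl
      set dB : PySem.Dict Int Int := ed.items.foldl
          (fun (d : PySem.Dict Int Int) p =>
            d.insert p.1 (if PySem.Set.contains (PySem.Set.ofList flat) p.1 then gn else p.2))
          PySem.Dict.empty with hdB
      have hdB_keys : dB.keys = ed.keys := by
        show dB.items.map Prod.fst = ed.items.map Prod.fst
        rw [hrebuild, List.map_map]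
        rfl
      rw [insNew_items gn M dB hMnd, hrebuild]
      -- the two item lists coincide piecewise
      congr 1
      · -- mapped originals
        apply List.map_congr_left
        intro p _
        by_cases hp : p.1 ∈ flat
        · have hpM : p.1 ∈ M := (hmemM p.1).2 hp
          simp [hp, hpM]
        · have hpM : p.1 ∉ M := fun h => hp ((hmemM p.1).1 h)
          simp [hp, hpM]
      · -- appended new entities: same filter predicate
        congr 1
        apply List.filter_congr
        intro x _
        have : dB.contains x = ed.contains x := by
          rw [PySem.Dict.contains_eq_decide_mem_keys, PySem.Dict.contains_eq_decide_mem_keys, hdB_keys]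
        rw [this]
    · -- g2e component
      have hgkeys : ∀ g ∈ gs, g ∈ gd.keys := by
        intro g hg; rw [hgd_keys]; exact hk g hg
      have hA2 : (pvFlat gs gd).2.items
          = gd.items.map (fun p => if p.1 ∈ gs then (p.1, ([] : List Int)) else p) :=
        pvFlat_snd gs gd hgkeys
      have hfreshB : ∀ p ∈ gd.items, (PySem.Dict.empty : PySem.Dict Int (List Int)).contains p.1 = false := by
        intro p _; exact PySem.Dict.contains_empty p.1
      have hrebuild : (gd.items.foldl
          (fun (d : PySem.Dict Int (List Int)) p =>
            d.insert p.1 (if PySem.Set.contains (PySem.Set.ofList gs) p.1 then ([] : List Int) else p.2))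
          PySem.Dict.empty).items
          = gd.items.map (fun p => (p.1, if PySem.Set.contains (PySem.Set.ofList gs) p.1 then ([] : List Int) else p.2)) := by
        rw [PySem.Dict.items_foldl_insert_fresh (k := Prod.fst)
              (v := fun p => if PySem.Set.contains (PySem.Set.ofList gs) p.1 then ([] : List Int) else p.2)
              (l := gd.items) (d := PySem.Dict.empty) hfreshB (by rw [hgd_items]; exact hnd_g)]
        rfl
      have hdicts : (pvFlat gs gd).2
          = gd.items.foldl
              (fun (d : PySem.Dict Int (List Int)) p =>
                d.insert p.1 (if PySem.Set.contains (PySem.Set.ofList gs) p.1 then ([] : List Int) else p.2))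
              PySem.Dict.empty := by
        apply PySem.Dict.ext
        rw [hA2, hrebuild]
        apply List.map_congr_left
        intro p _
        by_cases hp : p.1 ∈ gs
        · simp [hp]
        · simp [hp]
      rw [hdicts]
      -- A's merged_entities keys = M
      rw [keys_insAllM flat, ← hM]
  · have hle : gs.length ≤ 1 := by omega
    simp [hlen, hle]
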